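-- pv_equiv track=rewrite | github.com/junwenxiong/Automatic-human-video-extraction | video_process/video_post_filter.py | judge_av_consistency
-- ===== SOURCE A (Python) =====
-- def judge_av_consistency(scores):
--     if scores == []:
--         return [], 0
--
--     frame_len = len(scores)
--
--     current_sequence = 0
--     max_sequence = 0
--     start_index = 0
--     end_index = 0
--     seq_list = []
--     for i, item in enumerate(scores):
--         if item == [[1]]:
--             if current_sequence == 0:
--                 start_index = i
--             current_sequence += 1
--             end_index = i
--             if current_sequence > max_sequence:
--                 max_sequence = current_sequence
--         else:
--             current_sequence = 0
--             if max_sequence > 0: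
--                 seq_list.append([start_index, end_index])
--                 max_sequence = 0
--
--     return seq_list, frame_len
-- ===== SOURCE B (Python) =====
-- def judge_av_consistency(scores):
--     flags = [s == [[1]] for s in scores]
--     starts = [i for i, (prev, cur) in enumerate(zip([False] + flags, flags)) if cur and not prev]
--     ends = [i for i, (cur, nxt) in enumerate(zip(flags, flags[1:])) if cur and not nxt]
--     return [[s, e] for s, e in zip(starts, ends)], len(scores)
-- ===== Notes on version B (the rewrite author's own statement) =====
-- stated objective: idiomatic
-- what changed: Replaces A's stateful scan with current/max run counters and start/end registers by an edge-detection formulation: rising edges of the match-flag list give run starts, falling edges give run ends, and zip pairs them so the unfinished trailing run is dropped automatically.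
import Mathlib
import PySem

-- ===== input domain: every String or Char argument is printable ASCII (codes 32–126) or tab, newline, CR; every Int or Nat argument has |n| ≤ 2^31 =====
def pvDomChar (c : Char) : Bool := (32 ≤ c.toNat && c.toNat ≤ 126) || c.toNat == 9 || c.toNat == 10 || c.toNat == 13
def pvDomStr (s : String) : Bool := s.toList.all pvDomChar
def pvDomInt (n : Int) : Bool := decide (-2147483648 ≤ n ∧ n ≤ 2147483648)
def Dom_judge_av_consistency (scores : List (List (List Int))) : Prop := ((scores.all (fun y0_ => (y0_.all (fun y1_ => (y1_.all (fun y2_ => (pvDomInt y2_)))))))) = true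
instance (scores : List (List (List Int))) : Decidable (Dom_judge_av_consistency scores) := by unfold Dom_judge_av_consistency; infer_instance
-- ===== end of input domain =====

-- B replaces A's stateful single scan (current/max run counters, start/end registers)
-- by an edge-detection formulation: rising edges give run starts, falling edges give run
-- ends, and zip truncates the unfinished trailing run — objective: simpler/idiomatic.

-- ===== PORT A =====
-- the enumerate loop of A, carried as structural recursion over the same state
-- (i, current_sequence, max_sequence, start_index, end_index, seq_list)
def judgeLoopA (xs : List (List (List Int))) (i cs ms si ei : Int)
    (acc : List (List Int)) : List (List Int) :=
  match xs with
  | [] => acc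
  | item :: rest =>
    if item = [[1]] then
      let si' := if cs = 0 then i else si
      let cs' := cs + 1
      let ei' := i
      let ms' := if cs' > ms then cs' else ms
      judgeLoopA rest (i + 1) cs' ms' si' ei' acc
    else
      if ms > 0 then judgeLoopA rest (i + 1) 0 0 si ei (acc ++ [[si, ei]])
      else judgeLoopA rest (i + 1) 0 ms si ei acc

def judge_av_consistency (scores : List (List (List Int))) : List (List Int) × Int :=
  if scores = [] then ([], 0)
  else (judgeLoopA scores 0 0 0 0 0 [], (scores.length : Int))

-- ===== PORT B =====
def judge_av_consistency_alt (scores : List (List (List Int))) : List (List Int) × Int :=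
  let flags : List Bool := scores.map (fun s => decide (s = [[1]]))
  let starts : List Int :=
    (PySem.List.enumerate (List.zip (false :: flags) flags)).filterMap
      (fun p => if p.2.2 && !p.2.1 then some p.1 else none)
  let ends : List Int :=
    (PySem.List.enumerate (List.zip flags (PySem.List.slice flags (some 1) none))).filterMap
      (fun p => if p.2.1 && !p.2.2 then some p.1 else none)
  (List.zipWith (fun s e => [s, e]) starts ends, (scores.length : Int))

-- ===== PRECONDITION & SPEC =====
def Spec_judge_av_consistency (scores : List (List (List Int))) (out : List (List Int) × Int) : Prop := out = judge_av_consistency_alt scores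
instance (scores : List (List (List Int))) (out : List (List Int) × Int) : Decidable (Spec_judge_av_consistency scores out) := by unfold Spec_judge_av_consistency; infer_instance

-- ===== CLAIM (what is proved, stated in full; the proofs are below) =====
def Claim_equal_judge_av_consistency : Prop := ∀ (scores : List (List (List Int))), Dom_judge_av_consistency scores → Spec_judge_av_consistency scores (judge_av_consistency scores)

-- ===== LEMMAS AND PROOFS =====

-- canonical description of the completed runs of the flag list, starting at absolute
-- index k with an optional pending run start p (a pending run reaching the end is dropped)
def pvRuns (fs : List Bool) (k : Int) (p : Option Int) : List (List Int) :=
  match fs with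
  | [] => []
  | f :: rest =>
    if f then pvRuns rest (k + 1) (some (p.getD k))
    else (match p with | some s => [[s, k - 1]] | none => []) ++ pvRuns rest (k + 1) none

def pvStarts (prev : Bool) (fs : List Bool) (k : Int) : List Int :=
  match fs with
  | [] => []
  | f :: rest => (if f && !prev then [k] else []) ++ pvStarts f rest (k + 1)

def pvEnds (prev : Bool) (fs : List Bool) (k : Int) : List Int :=
  match fs with
  | [] => []
  | f :: rest => (if prev && !f then [k - 1] else []) ++ pvEnds f rest (k + 1)

theorem pvStarts_eq (fs : List Bool) : ∀ (prev : Bool) (k : Int),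
    (PySem.List.enumerate (List.zip (prev :: fs) fs) k).filterMap
      (fun p => if p.2.2 && !p.2.1 then some p.1 else none) = pvStarts prev fs k := by
  induction fs with
  | nil => intro prev k; simp [pvStarts]
  | cons f rest ih =>
    intro prev k
    simp only [List.zip_cons_cons, PySem.List.enumerate_cons, List.filterMap_cons, pvStarts]
    rw [ih f (k + 1)]
    by_cases h : f && !prev <;> simp [h]

theorem pvEnds_eq (fs : List Bool) : ∀ (prev : Bool) (k : Int),
    (PySem.List.enumerate (List.zip (prev :: fs) fs) (k - 1)).filterMap
      (fun p => if p.2.1 && !p.2.2 then some p.1 else none) = pvEnds prev fs k := by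
  induction fs with
  | nil => intro prev k; simp [pvEnds]
  | cons f rest ih =>
    intro prev k
    simp only [List.zip_cons_cons, PySem.List.enumerate_cons, List.filterMap_cons, pvEnds]
    have : k - 1 + 1 = (k + 1) - 1 := by ring
    rw [this, ih f (k + 1)]
    by_cases h : prev && !f <;> simp [h]

theorem pvZip_runs (fs : List Bool) : ∀ (k : Int) (p : Option Int),
    List.zipWith (fun s e => [s, e]) (p.toList ++ pvStarts p.isSome fs k) (pvEnds p.isSome fs k)
      = pvRuns fs k p := by
  induction fs with
  | nil => intro k p; simp [pvEnds, pvRuns]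
  | cons f rest ih =>
    intro k p
    cases hf : f
    · cases p with
      | none => simpa [pvStarts, pvEnds, pvRuns] using ih (k + 1) none
      | some s =>
        have h1 := ih (k + 1) none
        simp only [Option.toList, Option.isSome, List.nil_append] at h1
        simp [pvStarts, pvEnds, pvRuns, h1]
    · cases p with
      | none =>
        have h1 := ih (k + 1) (some k)
        simp only [Option.toList, Option.isSome, List.singleton_append] at h1
        simp [pvStarts, pvEnds, pvRuns, h1]
      | some s =>
        have h1 := ih (k + 1) (some s)
        simp only [Option.toList, Option.isSome, List.singleton_append] at h1
        simp [pvStarts, pvEnds, pvRuns, h1]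

theorem judgeLoopA_eq (xs : List (List (List Int))) : ∀ (i cs ms si ei : Int) (acc : List (List Int)),
    0 ≤ cs → (cs = 0 → ms = 0) → (0 < cs → 0 < ms ∧ ei = i - 1) →
    judgeLoopA xs i cs ms si ei acc
      = acc ++ pvRuns (xs.map (fun s => decide (s = [[1]]))) i (if 0 < cs then some si else none) := by
  induction xs with
  | nil => intro i cs ms si ei acc _ _ _; simp [judgeLoopA, pvRuns]
  | cons item rest ih =>
    intro i cs ms si ei acc hcs h0 hpos
    rw [judgeLoopA.eq_def]
    simp only [List.map_cons]
    by_cases hi : item = [[1]]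
    · rw [if_pos hi]
      have hrec := ih (i + 1) (cs + 1) (if cs + 1 > ms then cs + 1 else ms)
          (if cs = 0 then i else si) i acc (by omega)
          (fun h => absurd h (by omega))
          (by
            intro _
            refine ⟨?_, by ring⟩
            by_cases hms : cs + 1 > ms
            · rw [if_pos hms]; omega
            · rw [if_neg hms]
              rcases em (cs = 0) with h | h
              · have := h0 h; omega
              · have := (hpos (by omega)).1; omega)
      rw [hrec]
      have hp : (if 0 < cs + 1 then some (if cs = 0 then i else si) else none)
          = some ((if 0 < cs then some si else none).getD i) := by
        rcases em (cs = 0) with h | h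
        · simp [h]
        · have hc : 0 < cs := by omega
          rw [if_pos (by omega : (0:Int) < cs + 1), if_neg h, if_pos hc]
          simp
      rw [hp]
      simp [pvRuns, hi]
    · rw [if_neg hi]
      rcases em (cs = 0) with h | h
      · have hms : ¬ ms > 0 := by have := h0 h; omega
        rw [if_neg hms, ih (i + 1) 0 ms si ei acc le_rfl (fun _ => h0 h) (by omega)]
        simp [pvRuns, hi, h]
      · have hc : 0 < cs := by omega
        obtain ⟨hms, hei⟩ := hpos hc
        rw [if_pos (by omega : ms > 0),
          ih (i + 1) 0 0 si ei (acc ++ [[si, ei]]) le_rfl (fun _ => rfl) (by omega)]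
        simp [pvRuns, hi, hc, hei, List.append_assoc]

theorem alt_runs (scores : List (List (List Int))) :
    judge_av_consistency_alt scores
      = (pvRuns (scores.map (fun s => decide (s = [[1]]))) 0 none, (scores.length : Int)) := by
  have hends : ∀ (flags : List Bool),
      (PySem.List.enumerate (List.zip flags (PySem.List.slice flags (some 1) none))).filterMap
        (fun p => if p.2.1 && !p.2.2 then some p.1 else none) = pvEnds false flags 0 := by
    intro flags
    rw [PySem.List.slice_from_one]
    cases flags with
    | nil => simp [pvEnds]
    | cons f rest => simpa [pvEnds] using pvEnds_eq rest f 1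
  simp only [judge_av_consistency_alt]
  rw [pvStarts_eq, hends]
  simpa using pvZip_runs (scores.map (fun s => decide (s = [[1]]))) 0 none

-- ===== VERDICT (by name: the statement is the Claim_ definition above) =====
theorem judge_av_consistency_spec : Claim_equal_judge_av_consistency := by
  intro scores _
  unfold Spec_judge_av_consistency
  rw [alt_runs]
  unfold judge_av_consistency
  by_cases h : scores = []
  · subst h; simp [pvRuns]
  · rw [if_neg h, judgeLoopA_eq scores 0 0 0 0 0 [] le_rfl (fun _ => rfl) (by omega)]
    simp
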